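-- pv_equiv track=rewrite | github.com/daniel-reich/ubiquitous-fiesta | 3cyb3mdBKw67LpGP7_3.py | numbers_need_friends_too
-- ===== SOURCE A (Python) =====
-- from itertools import groupby
--
-- def numbers_need_friends_too(n):
--   s=str(n)
--   A=[list(g) for x, g in groupby(s)]
--   B=[]
--   for x in A:
--     if len(x)==1:
--       B.append(''.join(x*3))
--     else:
--       B.append(''.join(x))
--   return int(''.join(B))
-- ===== SOURCE B (Python) =====
-- def numbers_need_friends_too(n):
--   s = str(n)
--   out = []
--   for i in range(len(s)):
--     c = s[i]
--     if (i == 0 or s[i-1] != c) and (i == len(s) - 1 or s[i+1] != c):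
--       out.append(c * 3)
--     else:
--       out.append(c)
--   return int(''.join(out))
-- ===== Notes on version B (the rewrite author's own statement) =====
-- stated objective: simpler
-- what changed: Replaces the groupby run-grouping (build runs, triple the singleton runs, join) with a single index pass that triples a character exactly when it differs from both neighbours.
import Mathlib
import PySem

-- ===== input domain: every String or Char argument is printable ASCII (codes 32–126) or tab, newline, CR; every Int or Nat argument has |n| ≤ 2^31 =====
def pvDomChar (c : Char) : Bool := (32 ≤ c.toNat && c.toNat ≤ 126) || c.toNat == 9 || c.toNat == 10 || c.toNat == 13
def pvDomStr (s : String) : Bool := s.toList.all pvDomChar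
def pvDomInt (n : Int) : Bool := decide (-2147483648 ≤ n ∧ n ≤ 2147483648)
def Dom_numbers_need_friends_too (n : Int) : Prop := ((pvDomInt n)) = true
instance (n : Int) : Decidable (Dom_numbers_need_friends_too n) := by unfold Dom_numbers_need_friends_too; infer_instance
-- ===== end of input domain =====

-- B replaces A's groupby run-grouping with a single neighbour-comparison index pass (simpler decomposition, same O(d) cost).


-- ===== PORT A =====
-- itertools.groupby over str(n): split into maximal runs of equal characters
def groupRuns : List Char → List (List Char)
  | [] => []
  | c :: cs =>
      (c :: cs.takeWhile (fun d => d == c)) :: groupRuns (cs.dropWhile (fun d => d == c))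
termination_by s => s.length
decreasing_by
  simpa using Nat.lt_succ_of_le (List.length_dropWhile_le _ _)

-- ''.join(x*3) when the run is a singleton, else ''.join(x)
def trRun (x : List Char) : List Char := if x.length == 1 then x ++ x ++ x else x

def numbers_need_friends_too (n : Int) : Int :=
  let s := PySem.Int.toChars n
  let A := groupRuns s
  let B := A.map trRun
  -- int(''.join(B)); where Python raises ValueError (negative n, excluded by Pre_)
  -- ofChars? is none and the port falls back to a default.
  (PySem.Int.ofChars? B.flatten).getD 0

-- ===== PORT B =====
-- one index pass: s[i] is tripled iff it differs from both neighbours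
def nbrChunk (s : List Char) (i : Nat) : List Char :=
  let c := s.getD i ' '
  if (i == 0 || !(s.getD (i - 1) ' ' == c)) && (i == s.length - 1 || !(s.getD (i + 1) ' ' == c))
  then [c, c, c] else [c]

def numbers_need_friends_too_alt (n : Int) : Int :=
  let s := PySem.Int.toChars n
  (PySem.Int.ofChars? (((List.range s.length).map (nbrChunk s)).flatten)).getD 0

-- ===== PRECONDITION & SPEC =====
-- Pre_ excludes negative n: there str(n) starts with '-', the isolated '-' is tripled, and int('---…') raises ValueError in A (and in B).
def Pre_numbers_need_friends_too (n : Int) : Prop := 0 ≤ n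
instance (n : Int) : Decidable (Pre_numbers_need_friends_too n) := by unfold Pre_numbers_need_friends_too; infer_instance
def pvWitness_numbers_need_friends_too : Int := 1223334444

def Spec_numbers_need_friends_too (n : Int) (out : Int) : Prop := out = numbers_need_friends_too_alt n
instance (n : Int) (out : Int) : Decidable (Spec_numbers_need_friends_too n out) := by unfold Spec_numbers_need_friends_too; infer_instance

-- ===== CLAIM (what is proved, stated in full; the proofs are below) =====
def Claim_equal_numbers_need_friends_too : Prop := ∀ (n : Int), Dom_numbers_need_friends_too n → Pre_numbers_need_friends_too n → Spec_numbers_need_friends_too n (numbers_need_friends_too n)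

-- ===== LEMMAS AND PROOFS =====

-- middle form: a prev-aware structural recursion both ports are reduced to
def mid : Option Char → List Char → List Char
  | p, [c] => if p ≠ some c then [c, c, c] else [c]
  | p, c :: d :: rest => (if p ≠ some c ∧ c ≠ d then [c, c, c] else [c]) ++ mid (some c) (d :: rest)
  | _, [] => []

theorem mid_run (cs : List Char) (c : Char) :
    mid (some c) (c :: cs) =
      (c :: cs.takeWhile (fun d => d == c)) ++ mid (some c) (cs.dropWhile (fun d => d == c)) := by
  induction cs with
  | nil => simp [mid]
  | cons d cs ih =>
      by_cases h : d = c
      · subst h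
        simp only [mid, List.takeWhile, List.dropWhile, beq_self_eq_true]
        simp only [if_neg (by simp : ¬ (some d ≠ some d ∧ d ≠ d))]
        rw [ih]
        simp
      · have hb : (d == c) = false := by simp [h]
        simp [mid, List.takeWhile, List.dropWhile, hb]

theorem dropWhile_head_ne (cs : List Char) (c : Char) (d : Char) (rest : List Char)
    (h : cs.dropWhile (fun x => x == c) = d :: rest) : d ≠ c := by
  have := List.head_dropWhile_not (fun x => x == c) (l := cs) (by simp [h])
  simp only [h] at this
  simpa using this

theorem A_mid (s : List Char) (p : Option Char)
    (hp : ∀ c, s.head? = some c → p ≠ some c) :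
    ((groupRuns s).map trRun).flatten = mid p s := by
  induction hn : s.length using Nat.strong_induction_on generalizing s p with
  | _ n ih =>
  match s, hp with
  | [], _ => simp [groupRuns, mid]
  | [c], hp =>
      have : p ≠ some c := hp c rfl
      simp [groupRuns, trRun, mid, this]
  | c :: d :: cs, hp =>
      have hpc : p ≠ some c := hp c rfl
      by_cases h : d = c
      · subst h
        rw [groupRuns]
        simp only [List.takeWhile, List.dropWhile, beq_self_eq_true, List.map_cons, List.flatten_cons]
        have hrec : ((groupRuns (cs.dropWhile (fun x => x == d))).map trRun).flatten
            = mid (some d) (cs.dropWhile (fun x => x == d)) := by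
          apply ih (cs.dropWhile (fun x => x == d)).length
          · subst hn
            have := List.length_dropWhile_le (fun x => x == d) cs
            simp only [List.length_cons]; omega
          · intro e he
            cases hcase : cs.dropWhile (fun x => x == d) with
            | nil => simp [hcase] at he
            | cons e' rest' =>
                rw [hcase] at he; simp at he; subst he
                have := dropWhile_head_ne cs d e' rest' hcase
                intro hcontra
                injection hcontra with h'
                exact this h'.symm
          · rfl
        have htr : trRun (d :: d :: cs.takeWhile (fun x => x == d))
            = d :: d :: cs.takeWhile (fun x => x == d) := by
          simp [trRun]
        rw [htr]
        show d :: d :: cs.takeWhile (fun x => x == d) ++ _ = mid p (d :: d :: cs)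
        rw [mid]
        simp only [if_neg (by simp : ¬ (p ≠ some d ∧ d ≠ d))]
        rw [mid_run cs d, hrec]
        simp
      · -- run of length 1
        have hb : (d == c) = false := by simp [h]
        rw [groupRuns]
        simp only [List.takeWhile, List.dropWhile, hb, List.map_cons, List.flatten_cons]
        have hrec : ((groupRuns (d :: cs)).map trRun).flatten = mid (some c) (d :: cs) := by
          apply ih (d :: cs).length
          · subst hn; simp
          · intro e he; simp at he; subst he
            intro hcontra
            injection hcontra with h'
            exact h h'.symm
          · rfl
        rw [hrec, mid]
        simp [trRun, hpc, h, Ne.symm]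

-- prev of position i in s, as B's index pass sees it
def prevAt (s : List Char) (i : Nat) : Option Char :=
  if i = 0 then none else some (s.getD (i - 1) ' ')

theorem B_mid (s : List Char) (i : Nat) (hi : i ≤ s.length) :
    ((List.range' i (s.length - i)).map (nbrChunk s)).flatten = mid (prevAt s i) (s.drop i) := by
  induction hk : s.length - i using Nat.strong_induction_on generalizing i with
  | _ k ih =>
  cases k with
  | zero =>
      have : i = s.length := by omega
      subst this
      simp [mid, List.drop_length]
  | succ k' =>
      have hlt : i < s.length := by omega
      have hrange : List.range' i (k' + 1) = i :: List.range' (i + 1) k' := by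
        simp [List.range'_succ]
      rw [hrange]
      simp only [List.map_cons, List.flatten_cons]
      have hdrop : s.drop i = s[i] :: s.drop (i + 1) := List.drop_eq_getElem_cons hlt
      have hgetD : s.getD i ' ' = s[i] := by
        simp [List.getD_eq_getElem?_getD, List.getElem?_eq_getElem hlt]
      have hrec : ((List.range' (i + 1) (s.length - (i + 1))).map (nbrChunk s)).flatten
          = mid (prevAt s (i + 1)) (s.drop (i + 1)) := by
        apply ih (s.length - (i + 1)) (by omega) (i + 1) (by omega) rfl
      have hk' : k' = s.length - (i + 1) := by omega
      subst hk'
      rw [hrec, hdrop]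
      -- now compare the chunk at i with mid's head step
      have hprev1 : prevAt s (i + 1) = some (s.getD i ' ') := by
        simp [prevAt]
      cases hdrop1 : s.drop (i + 1) with
      | nil =>
          -- i is the last index
          have hilast : i = s.length - 1 := by
            have := List.length_drop (l := s) (i := i + 1)
            rw [hdrop1] at this; simp at this; omega
          rw [mid]
          simp only [nbrChunk, hgetD]
          have hlastb : (i == s.length - 1) = true := by simp [hilast]
          rw [hprev1, mid]
          simp only [hlastb, Bool.or_true, Bool.and_true]
          by_cases h0 : i = 0
          · have : prevAt s i = none := by simp [prevAt, h0]
            rw [this]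
            simp [h0, hgetD]
          · have hpv : prevAt s i = some (s.getD (i - 1) ' ') := by simp [prevAt, h0]
            rw [hpv]
            have h0b : (i == 0) = false := by simp [h0]
            simp only [h0b, Bool.false_or]
            by_cases hne : s.getD (i - 1) ' ' = s[i]
            · simp [hne]
            · simp [hne, Ne.symm]
      | cons d rest =>
          have hlt1 : i + 1 < s.length := by
            have := List.length_drop (l := s) (i := i + 1)
            rw [hdrop1] at this; simp at this; omega
          have h2 : s.drop (i + 1) = s[i + 1] :: s.drop (i + 2) :=
            List.drop_eq_getElem_cons hlt1
          have hdd : d = s[i + 1] := (List.cons_eq_cons.mp (hdrop1.symm.trans h2)).1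
          have hnotlast : (i == s.length - 1) = false := by
            simp; omega
          have hget1 : s.getD (i + 1) ' ' = d := by
            rw [hdd]
            simp [List.getD_eq_getElem?_getD, List.getElem?_eq_getElem hlt1]
          rw [mid, hprev1, hgetD]
          simp only [nbrChunk, hgetD, hnotlast, Bool.false_or, hget1]
          by_cases h0 : i = 0
          · subst h0
            have hpn : prevAt s 0 = none := by simp [prevAt]
            rw [hpn]
            congr 1
            refine if_congr ?_ rfl rfl
            simp [ne_comm]
          · have hpv : prevAt s i = some (s.getD (i - 1) ' ') := by simp [prevAt, h0]
            rw [hpv]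
            have h0b : (i == 0) = false := by simp [h0]
            congr 1
            refine if_congr ?_ rfl rfl
            simp [h0b, ne_comm, List.getD_eq_getElem?_getD]
theorem flatten_eq (s : List Char) :
    ((groupRuns s).map trRun).flatten = ((List.range s.length).map (nbrChunk s)).flatten := by
  rw [A_mid s none (by intro c _; simp)]
  have := B_mid s 0 (Nat.zero_le _)
  simpa [List.range_eq_range', prevAt] using this.symm

-- ===== VERDICT (by name: the statement is the Claim_ definition above) =====
theorem numbers_need_friends_too_spec : Claim_equal_numbers_need_friends_too := by
  intro n _ _
  unfold Spec_numbers_need_friends_too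
  simp only [numbers_need_friends_too, numbers_need_friends_too_alt, flatten_eq]
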